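-- pv_equiv track=rewrite | github.com/paalso/mipt_python_course | 4_arithmetics_and_lists/6.py | get_median
-- ===== SOURCE A (Python) =====
-- def get_median(L):
--     for item in L:
--         counter = 0
--         for el in L:
--             if el == item:
--                 continue
--             counter += 1 if el > item else -1
--         if counter == 0:
--             return item
-- ===== SOURCE B (Python) =====
-- def get_median(L):
--     counts = {}
--     for x in L:
--         counts[x] = counts.get(x, 0) + 1
--     less = {}
--     acc = 0
--     for v in sorted(counts):
--         less[v] = acc
--         acc += counts[v]
--     n = len(L)
--     for item in L:
--         if 2 * less[item] + counts[item] == n: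
--             return item
--     return None
-- ===== Notes on version B (the rewrite author's own statement) =====
-- stated objective: faster
-- what changed: Replaced the per-item O(n) inner counting loop with a one-pass value-count dict plus a sorted prefix-sum dict of strictly-smaller counts, so the scan over L checks each item in O(1).
import Mathlib
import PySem

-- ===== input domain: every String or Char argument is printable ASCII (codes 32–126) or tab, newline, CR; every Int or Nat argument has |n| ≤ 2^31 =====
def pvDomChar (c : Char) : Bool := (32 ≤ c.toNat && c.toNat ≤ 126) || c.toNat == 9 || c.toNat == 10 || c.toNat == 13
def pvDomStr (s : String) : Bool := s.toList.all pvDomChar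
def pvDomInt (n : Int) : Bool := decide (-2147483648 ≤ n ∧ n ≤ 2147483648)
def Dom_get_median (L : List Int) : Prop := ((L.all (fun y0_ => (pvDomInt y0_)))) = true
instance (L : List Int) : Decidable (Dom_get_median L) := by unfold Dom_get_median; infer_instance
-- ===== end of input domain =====

-- B replaces A's quadratic per-item counting loop by a value-count dict and a sorted
-- prefix-sum dict, then a single O(1)-per-item scan of L.

-- ===== PORT A =====
-- the outer 'for item in L: … return item' loop of A (early return = recursion)
def getMedianScanA (L : List Int) : List Int → Option Int
  | [] => none
  | item :: rest =>
    let counter := L.foldl (fun c el =>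
      if el == item then c else if el > item then c + 1 else c - 1) (0 : Int)
    if counter == 0 then some item else getMedianScanA L rest

def get_median (L : List Int) : Option Int := getMedianScanA L L

-- ===== PORT B =====
-- the final 'for item in L: … return item' loop of B
def getMedianScanB (less counts : PySem.Dict Int Int) (n : Int) : List Int → Option Int
  | [] => none
  | item :: rest =>
    if 2 * less.getD item 0 + counts.getD item 0 == n then some item
    else getMedianScanB less counts n rest

def get_median_alt (L : List Int) : Option Int :=
  let counts := L.foldl (fun d x => d.insert x (d.getD x 0 + 1)) PySem.Dict.empty
  let p := (PySem.List.sorted counts.keys (fun v => v) false).foldl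
      (fun (s : PySem.Dict Int Int × Int) v => (s.1.insert v s.2, s.2 + counts.getD v 0))
      (PySem.Dict.empty, 0)
  getMedianScanB p.1 counts (L.length : Int) L

-- ===== PRECONDITION & SPEC =====
def Spec_get_median (L : List Int) (out : Option Int) : Prop := out = get_median_alt L
instance (L : List Int) (out : Option Int) : Decidable (Spec_get_median L out) := by unfold Spec_get_median; infer_instance

-- ===== CLAIM (what is proved, stated in full; the proofs are below) =====
def Claim_equal_get_median : Prop := ∀ (L : List Int), Dom_get_median L → Spec_get_median L (get_median L)

-- ===== LEMMAS AND PROOFS =====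

-- proof-only names for the two dicts B builds (definitionally the port's let-values)
def pvCounts (L : List Int) : PySem.Dict Int Int :=
  L.foldl (fun d x => d.insert x (d.getD x 0 + 1)) PySem.Dict.empty

def pvLess (L : List Int) : PySem.Dict Int Int :=
  ((PySem.List.sorted (pvCounts L).keys (fun v => v) false).foldl
    (fun (s : PySem.Dict Int Int × Int) v => (s.1.insert v s.2, s.2 + (pvCounts L).getD v 0))
    (PySem.Dict.empty, 0)).1

-- A's inner loop computes (#elements > item) - (#elements < item)
theorem counterA_eq (item : Int) : ∀ (M : List Int) (c : Int),
    M.foldl (fun c el => if el == item then c else if el > item then c + 1 else c - 1) c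
      = c + (M.countP (fun el => decide (item < el)) : Int)
          - (M.countP (fun el => decide (el < item)) : Int) := by
  intro M
  induction M with
  | nil => intro c; simp
  | cons x t ih =>
    intro c
    simp only [List.foldl_cons, List.countP_cons]
    by_cases h1 : x = item
    · subst h1
      simp only [beq_self_eq_true, if_true, ih, decide_eq_false (lt_irrefl x),
        Bool.false_eq_true, if_false]
      push_cast; ring
    · have hb : (x == item) = false := beq_eq_false_iff_ne.mpr h1
      simp only [hb, Bool.false_eq_true, if_false]
      by_cases h2 : x > item
      · have d1 : decide (item < x) = true := decide_eq_true h2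
        have d2 : decide (x < item) = false := decide_eq_false (by omega)
        rw [if_pos h2, ih]
        simp only [d1, d2, if_true, Bool.false_eq_true, if_false]
        push_cast; ring
      · have d1 : decide (item < x) = false := decide_eq_false h2
        have d2 : decide (x < item) = true := decide_eq_true (by omega)
        rw [if_neg h2, ih]
        simp only [d1, d2, if_true, Bool.false_eq_true, if_false]
        push_cast; ring

-- trichotomy partition of the length
theorem countP_partition (item : Int) (L : List Int) :
    L.countP (fun el => decide (el < item)) + L.count item
      + L.countP (fun el => decide (item < el)) = L.length := by
  induction L with
  | nil => simp
  | cons x t ih =>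
    simp only [List.countP_cons, List.count_cons, List.length_cons]
    rcases lt_trichotomy x item with h | h | h
    · have d1 : decide (x < item) = true := decide_eq_true h
      have d2 : decide (item < x) = false := decide_eq_false (by omega)
      have d3 : (x == item) = false := beq_eq_false_iff_ne.mpr (by omega)
      simp only [d1, d2, d3, if_true, Bool.false_eq_true, if_false]
      omega
    · subst h
      simp only [decide_eq_false (lt_irrefl x), Bool.false_eq_true, if_false, BEq.rfl, if_true]
      omega
    · have d1 : decide (x < item) = false := decide_eq_false (by omega)
      have d2 : decide (item < x) = true := decide_eq_true h
      have d3 : (x == item) = false := beq_eq_false_iff_ne.mpr (by omega)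
      simp only [d1, d2, d3, if_true, Bool.false_eq_true, if_false]
      omega

-- counts dict: value → multiplicity
theorem counts_getD (L : List Int) (v : Int) :
    (pvCounts L).getD v 0 = (L.count v : Int) := by
  unfold pvCounts
  rw [PySem.Dict.getD_foldl_insert_add_one]
  simp [PySem.Dict.getD_empty]

-- if v is never inserted, getD is unchanged through the prefix fold
theorem lessFold_getD_not_mem (counts : PySem.Dict Int Int) :
    ∀ (ks : List Int) (d : PySem.Dict Int Int) (a v : Int), v ∉ ks →
    ((ks.foldl (fun (s : PySem.Dict Int Int × Int) v => (s.1.insert v s.2, s.2 + counts.getD v 0))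
      (d, a)).1).getD v 0 = d.getD v 0 := by
  intro ks
  induction ks with
  | nil => intro d a v _; rfl
  | cons k t ih =>
    intro d a v hv
    have hvk : v ≠ k := by intro e; exact hv (e ▸ List.mem_cons_self)
    have hvt : v ∉ t := fun h => hv (List.mem_cons_of_mem _ h)
    simp only [List.foldl_cons]
    rw [ih _ _ _ hvt, PySem.Dict.getD_insert, if_neg hvk]

-- value stored for v by the prefix fold over a strictly increasing key list
theorem lessFold_getD (counts : PySem.Dict Int Int) :
    ∀ (ks : List Int) (d : PySem.Dict Int Int) (a v : Int),
    ks.Pairwise (· < ·) → v ∈ ks →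
    ((ks.foldl (fun (s : PySem.Dict Int Int × Int) v => (s.1.insert v s.2, s.2 + counts.getD v 0))
      (d, a)).1).getD v 0
      = a + ((ks.filter (fun k => decide (k < v))).map (fun k => counts.getD k 0)).sum := by
  intro ks
  induction ks with
  | nil => intro d a v _ hv; simp at hv
  | cons k t ih =>
    intro d a v hp hv
    have hk : ∀ y ∈ t, k < y := (List.pairwise_cons.mp hp).1
    have hpt : t.Pairwise (· < ·) := (List.pairwise_cons.mp hp).2
    simp only [List.foldl_cons]
    rcases List.mem_cons.mp hv with hvk | hvt
    · subst hvk
      have hvnot : v ∉ t := fun h => lt_irrefl v (hk v h)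
      rw [lessFold_getD_not_mem counts t _ _ _ hvnot]
      rw [PySem.Dict.getD_insert, if_pos rfl]
      have hf : (v :: t).filter (fun k => decide (k < v)) = [] := by
        simp only [List.filter_cons, decide_eq_false (lt_irrefl v), Bool.false_eq_true, if_false]
        rw [List.filter_eq_nil_iff]
        intro x hx
        simp only [decide_eq_true_eq]
        exact fun h => lt_irrefl v (lt_trans (hk x hx) h)
      rw [hf]; simp
    · have hkv : k < v := hk v hvt
      rw [ih _ _ _ hpt hvt]
      simp only [List.filter_cons, decide_eq_true hkv, if_true, List.map_cons, List.sum_cons]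
      ring

-- a 0/1 indicator sum over a Nodup list
theorem sum_map_indicator (x : Int) :
    ∀ (T : List Int), T.Nodup →
    (T.map (fun k => if k = x then (1 : Int) else 0)).sum = if x ∈ T then 1 else 0 := by
  intro T
  induction T with
  | nil => simp
  | cons k t ih =>
    intro hnd
    rcases List.nodup_cons.mp hnd with ⟨hk, ht⟩
    simp only [List.map_cons, List.sum_cons, ih ht]
    by_cases hkx : k = x
    · subst hkx; simp [hk]
    · have hxk : ¬ x = k := fun e => hkx e.symm
      by_cases hx : x ∈ t
      · simp [hkx, hx, List.mem_cons, hxk]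
      · simp [hkx, hx, List.mem_cons, hxk]

-- summing multiplicities of the distinct values satisfying q gives countP q
theorem sum_counts_filter (q : Int → Bool) (S : List Int) (hnd : S.Nodup) :
    ∀ (L : List Int), (∀ x ∈ L, q x = true → x ∈ S) →
    ((S.filter q).map (fun k => (L.count k : Int))).sum = (L.countP q : Int) := by
  intro L
  induction L with
  | nil => simp
  | cons x t ih =>
    intro hsub
    have ht : ∀ y ∈ t, q y = true → y ∈ S := fun y hy => hsub y (List.mem_cons_of_mem _ hy)
    have step : ((S.filter q).map (fun k => ((x :: t).count k : Int))).sum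
        = ((S.filter q).map (fun k => (t.count k : Int))).sum
          + ((S.filter q).map (fun k => if k = x then (1 : Int) else 0)).sum := by
      rw [← PySem.List.sum_map_add_int]
      congr 1
      apply List.map_congr_left
      intro k _
      rw [List.count_cons]
      by_cases h : k = x
      · simp [h]
      · have hb : (x == k) = false := beq_eq_false_iff_ne.mpr (fun e => h e.symm)
        simp [h, hb]
    rw [step, ih ht, sum_map_indicator x _ (hnd.filter q)]
    rw [List.countP_cons]
    by_cases hq : q x = true
    · have hxS : x ∈ S.filter q := List.mem_filter.mpr ⟨hsub x List.mem_cons_self hq, hq⟩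
      simp only [hq, if_true, hxS]
      push_cast; ring
    · have hq' : q x = false := by revert hq; cases q x <;> simp
      have hxS : x ∉ S.filter q := fun h => hq (List.mem_filter.mp h).2
      simp only [hq', Bool.false_eq_true, if_false, if_neg hxS]
      omega

-- the per-item conditions of A and B coincide for item ∈ L
theorem cond_eq (L : List Int) (item : Int) (hmem : item ∈ L) :
    ((L.foldl (fun c el => if el == item then c else if el > item then c + 1 else c - 1) (0 : Int)) == 0)
      = (2 * (pvLess L).getD item 0 + (pvCounts L).getD item 0 == (L.length : Int)) := by
  have hkeys : (pvCounts L).keys = PySem.Set.ofList L := by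
    unfold pvCounts
    rw [PySem.Dict.keys_foldl_insert]
    exact PySem.Set.update_nil_left L
  have hpw : (PySem.List.sorted (pvCounts L).keys (fun v => v) false).Pairwise (· < ·) := by
    rw [hkeys]; exact PySem.List.sorted_ofList_pairwise_lt L
  have hmemks : item ∈ PySem.List.sorted (pvCounts L).keys (fun v => v) false := by
    rw [PySem.List.mem_sorted, hkeys, PySem.Set.mem_ofList]; exact hmem
  have hless : (pvLess L).getD item 0 = (L.countP (fun el => decide (el < item)) : Int) := by
    unfold pvLess
    rw [lessFold_getD (pvCounts L) _ PySem.Dict.empty 0 item hpw hmemks]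
    rw [List.map_congr_left (fun k _ => counts_getD L k)]
    rw [sum_counts_filter _ _ hpw.nodup L
      (fun x hx _ => by rw [PySem.List.mem_sorted, hkeys, PySem.Set.mem_ofList]; exact hx)]
    simp
  rw [counterA_eq item L 0, hless, counts_getD]
  have hpart := countP_partition item L
  exact decide_eq_decide.mpr (by omega)

-- the two scans agree on any sublist of L's elements
theorem scan_eq (L : List Int) :
    ∀ (M : List Int), (∀ x ∈ M, x ∈ L) →
    getMedianScanA L M = getMedianScanB (pvLess L) (pvCounts L) (L.length : Int) M := by
  intro M
  induction M with
  | nil => intro _; rfl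
  | cons item rest ih =>
    intro hsub
    simp only [getMedianScanA, getMedianScanB]
    rw [← cond_eq L item (hsub item List.mem_cons_self)]
    split
    · rfl
    · exact ih (fun x hx => hsub x (List.mem_cons_of_mem _ hx))

-- ===== VERDICT (by name: the statement is the Claim_ definition above) =====
theorem get_median_spec : Claim_equal_get_median := by
  intro L _
  unfold Spec_get_median
  exact scan_eq L L (fun _ h => h)
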